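-- pv_equiv track=rewrite | github.com/note-ai-inc/handwriting-synthesis | main.py | split_stroke_by_eos
-- ===== SOURCE A (Python) =====
-- def split_stroke_by_eos(stroke_coords):
--     segments = []
--     current_segment = []
--     for pt in stroke_coords:
--         current_segment.append(pt)
--         if pt[2] == 1:
--             segments.append(current_segment)
--             current_segment = []
--     if current_segment:
--         current_segment[-1][2] = 1
--         segments.append(current_segment)
--     return segments
-- ===== SOURCE B (Python) =====
-- def split_stroke_by_eos(stroke_coords):
--     # normalise a dangling tail up front (same in-place flag fix A performs),
--     # then build the segments back-to-front over the reversed point list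
--     if stroke_coords and stroke_coords[-1][2] != 1:
--         stroke_coords[-1][2] = 1
--     groups = []
--     for pt in reversed(stroke_coords):
--         if pt[2] == 1 or not groups:
--             groups.append([pt])
--         else:
--             groups[-1].append(pt)
--     return [g[::-1] for g in reversed(groups)]
-- ===== Notes on version B (the rewrite author's own statement) =====
-- stated objective: alternative
-- what changed: B normalises a dangling tail's end-of-stroke flag up front and then builds the segments back-to-front by scanning the reversed point list (a flagged point opens a new group) and reversing the groups at the end, instead of A's forward scan with a current-segment accumulator and a post-loop patch.
import Mathlib
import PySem

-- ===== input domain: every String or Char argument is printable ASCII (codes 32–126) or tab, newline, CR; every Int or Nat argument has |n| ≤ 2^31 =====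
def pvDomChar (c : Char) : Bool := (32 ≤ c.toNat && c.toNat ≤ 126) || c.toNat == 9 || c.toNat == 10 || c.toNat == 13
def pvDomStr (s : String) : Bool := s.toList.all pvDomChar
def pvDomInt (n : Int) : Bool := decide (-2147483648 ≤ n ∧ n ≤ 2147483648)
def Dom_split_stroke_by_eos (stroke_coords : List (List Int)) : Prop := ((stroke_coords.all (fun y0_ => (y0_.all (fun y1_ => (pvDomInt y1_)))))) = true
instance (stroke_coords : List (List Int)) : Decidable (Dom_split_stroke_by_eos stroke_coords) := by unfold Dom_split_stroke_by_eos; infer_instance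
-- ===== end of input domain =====

-- B builds the segments back-to-front over the reversed point list after normalising the
-- dangling tail's flag up front (same in-place fix A performs on its tail segment's last point);
-- equivalence proved for the RETURN value; both A and B mutate the last input point in place
-- in exactly the same case.


-- ===== PORT A =====
-- Python's `pt[2] == 1`; exact under Pre_ (index 2 exists there)
def pvEos (pt : List Int) : Bool := (PySem.List.pyGet? pt 2).getD 0 == 1

def pvAStep (acc : List (List (List Int)) × List (List Int)) (pt : List Int) :
    List (List (List Int)) × List (List Int) :=
  let cur := acc.2 ++ [pt]
  if pvEos pt then (acc.1 ++ [cur], ([] : List (List Int))) else (acc.1, cur)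

def split_stroke_by_eos (stroke_coords : List (List Int)) : List (List (List Int)) :=
  let p := stroke_coords.foldl pvAStep ([], [])
  if p.2 = [] then p.1
  -- `current_segment[-1][2] = 1`; List.set is exact under Pre_ (index 2 exists)
  else p.1 ++ [p.2.dropLast ++ [(p.2.getLast?.getD []).set 2 1]]

-- ===== PORT B =====
def pvBStep (gs : List (List (List Int))) (pt : List Int) : List (List (List Int)) :=
  if pvEos pt || gs.isEmpty then gs ++ [[pt]]
  -- `groups[-1].append(pt)`
  else gs.dropLast ++ [(gs.getLast?.getD []) ++ [pt]]

def split_stroke_by_eos_alt (stroke_coords : List (List Int)) : List (List (List Int)) :=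
  -- `if stroke_coords and stroke_coords[-1][2] != 1: stroke_coords[-1][2] = 1`
  let sc := match stroke_coords.getLast? with
    | none => stroke_coords
    | some lastPt =>
        if pvEos lastPt then stroke_coords
        else stroke_coords.dropLast ++ [lastPt.set 2 1]
  let groups := (sc.reverse).foldl pvBStep []
  (groups.reverse).map List.reverse

-- ===== PRECONDITION & SPEC =====
-- Pre_ excludes exactly the inputs on which Python A raises IndexError: a point with fewer than 3 coordinates.
def Pre_split_stroke_by_eos (stroke_coords : List (List Int)) : Prop :=
  ∀ pt ∈ stroke_coords, 3 ≤ pt.length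
instance (stroke_coords : List (List Int)) : Decidable (Pre_split_stroke_by_eos stroke_coords) := by unfold Pre_split_stroke_by_eos; infer_instance

def pvWitness_split_stroke_by_eos : List (List Int) := [[0, 0, 1], [1, 2, 0]]

def Spec_split_stroke_by_eos (stroke_coords : List (List Int)) (out : List (List (List Int))) : Prop := out = split_stroke_by_eos_alt stroke_coords
instance (stroke_coords : List (List Int)) (out : List (List (List Int))) : Decidable (Spec_split_stroke_by_eos stroke_coords out) := by unfold Spec_split_stroke_by_eos; infer_instance

-- ===== CLAIM (what is proved, stated in full; the proofs are below) =====
def Claim_equal_split_stroke_by_eos : Prop := ∀ (stroke_coords : List (List Int)), Dom_split_stroke_by_eos stroke_coords → Pre_split_stroke_by_eos stroke_coords → Spec_split_stroke_by_eos stroke_coords (split_stroke_by_eos stroke_coords)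

-- ===== LEMMAS AND PROOFS =====

-- reference splitter: natural structural recursion on the point list
def pvR : List (List Int) → List (List (List Int))
  | [] => []
  | pt :: rest =>
    if pvEos pt then [pt] :: pvR rest
    else match pvR rest with
      | [] => [[pt]]
      | s :: ss => (pt :: s) :: ss

-- A's loop-with-patch, as a recursion carrying the current segment
def pvG (cur : List (List Int)) : List (List Int) → List (List (List Int))
  | [] => if cur = [] then [] else [cur.dropLast ++ [(cur.getLast?.getD []).set 2 1]]
  | pt :: rest => if pvEos pt then (cur ++ [pt]) :: pvG [] rest else pvG (cur ++ [pt]) rest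

theorem pvA_eq_G (xs : List (List Int)) :
    ∀ segs cur,
      (let p := xs.foldl pvAStep (segs, cur)
       if p.2 = [] then p.1
       else p.1 ++ [p.2.dropLast ++ [(p.2.getLast?.getD []).set 2 1]]) = segs ++ pvG cur xs := by
  induction xs with
  | nil =>
      intro segs cur
      by_cases h : cur = [] <;> simp [pvG, h]
  | cons pt rest ih =>
      intro segs cur
      by_cases h : pvEos pt = true
      · simpa [pvAStep, pvG, h, List.append_assoc] using ih (segs ++ [cur ++ [pt]]) []
      · simpa [pvAStep, pvG, h] using ih segs (cur ++ [pt])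

-- on a list whose last point is flagged, pvG with any pending segment prepends it to pvR's head
theorem pvG_eq_R (ys : List (List Int)) (hne : ys ≠ [])
    (hlast : pvEos ((ys.getLast?).getD []) = true) :
    ∃ s ss, pvR ys = s :: ss ∧ ∀ cur, pvG cur ys = (cur ++ s) :: ss := by
  induction ys with
  | nil => exact absurd rfl hne
  | cons pt rest ih =>
      by_cases hr : rest = []
      · subst hr
        simp only [List.getLast?_singleton, Option.getD_some] at hlast
        exact ⟨[pt], [], by simp [pvR, hlast], fun cur => by simp [pvG, hlast]⟩
      · have hcons : (pt :: rest).getLast? = rest.getLast? := by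
          cases rest with
          | nil => exact absurd rfl hr
          | cons q qs => simp [List.getLast?_cons_cons]
        have hlast' : pvEos ((rest.getLast?).getD []) = true := by
          rwa [hcons] at hlast
        obtain ⟨s, ss, hR, hG⟩ := ih hr hlast'
        by_cases he : pvEos pt = true
        · refine ⟨[pt], pvR rest, by simp [pvR, he], fun cur => ?_⟩
          simp [pvG, he, hG [], hR]
        · refine ⟨pt :: s, ss, by simp [pvR, he, hR], fun cur => ?_⟩
          simp [pvG, he, hG (cur ++ [pt])]

-- flag-fixing the (unflagged) last point does not change pvG
theorem pvG_fix (zs : List (List Int)) :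
    ∀ cur pt, pvEos pt = false →
      pvG cur (zs ++ [pt]) = pvG cur (zs ++ [pt.set 2 1]) := by
  induction zs with
  | nil =>
      intro cur pt he
      have h2 : pvEos (pt.set 2 1) = true ∨ pvEos (pt.set 2 1) = false := by
        cases pvEos (pt.set 2 1) <;> simp
      rcases h2 with h2 | h2 <;> simp [pvG, he, h2]
  | cons q zs ih =>
      intro cur pt he
      by_cases hq : pvEos q = true <;> simp [pvG, hq, ih _ pt he]

-- B's reversed fold computes pvR
theorem pvB_eq_R (ys : List (List Int)) :
    (((ys.reverse).foldl pvBStep []).reverse).map List.reverse = pvR ys := by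
  rw [List.foldl_reverse]
  induction ys with
  | nil => simp [pvR]
  | cons pt rest ih =>
      simp only [List.foldr_cons]
      set gs := rest.foldr (fun x y => pvBStep y x) [] with hgs
      by_cases hg : gs = []
      · have hRr : pvR rest = [] := by rw [← ih, hg]; simp
        by_cases he : pvEos pt = true <;>
          simp [pvBStep, hg, pvR, he, hRr]
      · obtain ⟨init, g, hsplit⟩ := List.eq_nil_or_concat gs |>.resolve_left hg
        by_cases he : pvEos pt = true
        · simp [pvBStep, he, pvR, ← ih]
        · have hRr : pvR rest = g.reverse :: (init.reverse).map List.reverse := by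
            rw [← ih, hsplit]; simp
          simp [pvBStep, he, pvR, hRr, hsplit]

theorem pvEos_set (pt : List Int) (h3 : 3 ≤ pt.length) : pvEos (pt.set 2 1) = true := by
  have hl : 2 < pt.length := by omega
  simp [pvEos, PySem.List.pyGet?, PySem.List.pyIdx?, hl, List.getElem?_set]

-- ===== VERDICT (by name: the statement is the Claim_ definition above) =====
theorem split_stroke_by_eos_spec : Claim_equal_split_stroke_by_eos := by
  intro xs _hdom hpre
  unfold Spec_split_stroke_by_eos
  have hA : split_stroke_by_eos xs = pvG [] xs := by
    simpa using pvA_eq_G xs [] []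
  rcases List.eq_nil_or_concat xs with hnil | ⟨zs, pt, hsplit⟩
  · subst hnil
    simp [split_stroke_by_eos, split_stroke_by_eos_alt]
  · rw [List.concat_eq_append] at hsplit
    subst hsplit
    have h3 : 3 ≤ pt.length := hpre pt (by simp)
    have hlastq : (zs ++ [pt]).getLast? = some pt := by simp
    by_cases he : pvEos pt = true
    · -- last point already flagged: B leaves the list unchanged
      have hfix : split_stroke_by_eos_alt (zs ++ [pt]) = pvR (zs ++ [pt]) := by
        simp only [split_stroke_by_eos_alt, hlastq, he, if_pos]
        exact pvB_eq_R (zs ++ [pt])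
      obtain ⟨s, ss, hR, hG⟩ := pvG_eq_R (zs ++ [pt]) (by simp) (by simp [hlastq, he])
      rw [hA, hfix, hR, hG []]
      simp
    · have he' : pvEos pt = false := by simpa using he
      have hset : pvEos (pt.set 2 1) = true := pvEos_set pt h3
      have hfix : split_stroke_by_eos_alt (zs ++ [pt]) = pvR (zs ++ [pt.set 2 1]) := by
        simp only [split_stroke_by_eos_alt, hlastq, he', Bool.false_eq_true, if_false]
        rw [show (zs ++ [pt]).dropLast = zs by simp]
        exact pvB_eq_R (zs ++ [pt.set 2 1])
      obtain ⟨s, ss, hR, hG⟩ := pvG_eq_R (zs ++ [pt.set 2 1]) (by simp)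
        (by simp [hset])
      rw [hA, pvG_fix zs [] pt he', hfix, hR, hG []]
      simp
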